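-- pv_equiv track=rewrite | github.com/sydney0716/backjoonhub | 프로그래머스/2/388353. 지게차와 크레인/지게차와 크레인.py | solution
-- ===== SOURCE A (Python) =====
-- from collections import deque
--
-- dy_dx = [[0, 1], [1, 0], [0, -1], [-1, 0]]
--
-- def check_outside(matrix):
--     n, m = len(matrix), len(matrix[0])
--     # Make a matrix that shows visited or not
--     visited = [[False] * m for _ in range(n)]
--     # Start from 0, 0
--     queue = deque([(0, 0)])
--     visited[0][0] = True
--
--     while queue:
--         y, x = queue.popleft()
--         # Look for 4 direction
--         for dy, dx in dy_dx:
--             ny, nx = y + dy, x + dx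
--
--             if -1 < ny < n and - 1 < nx < m:
--                 # If that container is not visited and empty, append to queue
--                 if not visited[ny][nx] and matrix[ny][nx] == 0:
--                     visited[ny][nx] = True
--                     queue.append((ny, nx))
--     return visited
--
-- def solution(storage, requests):
--     answer = 0
--     n, m = len(storage), len(storage[0])
--     # Make a 0 padded matrix
--     mat = [[0] * (m + 2) for _ in range(n + 2)]
--     for i in range(n):
--         for j in range(m):
--             mat[i + 1][j + 1] = ord(storage[i][j])
--
--     # Get request
--     for request in requests:
--         target = ord(request[0])
--         # Check outside container every request
--         outside = check_outside(mat)
--         # Make a list for removing container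
--         to_remove = []
--
--         for i in range(1, n + 1):
--             for j in range(1, m + 1):
--                 if mat[i][j] == target:
--                     if len(request) == 2:
--                         # For crane, just remove
--                         to_remove.append((i, j))
--                     else:
--                         # For lift, check outside
--                         for dy, dx in [[0, 1], [1, 0], [0, -1], [-1, 0]]:
--                             if outside[i + dy][j + dx]:
--                                 to_remove.append((i, j))
--                                 break
--         # Remove container at once at the end
--         for r, c in to_remove:
--             mat[r][c] = 0
--
--     # Count remaining containers
--     for row in mat:
--         for container in row:
--             if container != 0:
--                 answer += 1
--     return answer
-- ===== SOURCE B (Python) =====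
-- from collections import deque
--
-- def solution(storage, requests):
--     n, m = len(storage), len(storage[0])
--     # padded ord-matrix built row-wise
--     mat = [[0] * (m + 2)] \
--         + [[0] + [ord(ch) for ch in row[:m]] + [0] for row in storage] \
--         + [[0] * (m + 2)]
--     for request in requests:
--         target = ord(request[0])
--         if len(request) == 2:
--             # crane: remove every matching container outright, no reachability needed
--             for row in mat:
--                 for j in range(m + 2):
--                     if row[j] == target:
--                         row[j] = 0
--         else:
--             # forklift: one BFS over empty cells from the border, collecting
--             # removable containers while expanding (pre-removal snapshot)
--             visited = [[False] * (m + 2) for _ in range(n + 2)]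
--             visited[0][0] = True
--             queue = deque([(0, 0)])
--             remove = set()
--             while queue:
--                 y, x = queue.popleft()
--                 for dy, dx in ((0, 1), (1, 0), (0, -1), (-1, 0)):
--                     ny, nx = y + dy, x + dx
--                     if 0 <= ny < n + 2 and 0 <= nx < m + 2:
--                         v = mat[ny][nx]
--                         if v == 0:
--                             if not visited[ny][nx]:
--                                 visited[ny][nx] = True
--                                 queue.append((ny, nx))
--                         elif v == target:
--                             remove.add((ny, nx))
--             for r, c in remove:
--                 mat[r][c] = 0
--     return sum(1 for row in mat for v in row if v != 0)
-- ===== Notes on version B (the rewrite author's own statement) =====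
-- stated objective: alternative
-- what changed: B branches on crane vs forklift first: a crane request is a plain scan that zeroes matching cells with no flood fill at all, and a forklift request runs one border BFS over empty cells that collects the removable containers into a set while expanding, replacing A's per-request full-grid rescan against the finished visited matrix; the padded matrix is built by row concatenation instead of index writes.
-- outside the precondition, e.g. on solution([], ['A']): A raises IndexError, B raises IndexError; on solution(['AB', 'C'], ['A']): A raises IndexError, B raises IndexError; on solution(['AB'], ['']): A raises IndexError, B raises IndexError
import Mathlib
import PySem

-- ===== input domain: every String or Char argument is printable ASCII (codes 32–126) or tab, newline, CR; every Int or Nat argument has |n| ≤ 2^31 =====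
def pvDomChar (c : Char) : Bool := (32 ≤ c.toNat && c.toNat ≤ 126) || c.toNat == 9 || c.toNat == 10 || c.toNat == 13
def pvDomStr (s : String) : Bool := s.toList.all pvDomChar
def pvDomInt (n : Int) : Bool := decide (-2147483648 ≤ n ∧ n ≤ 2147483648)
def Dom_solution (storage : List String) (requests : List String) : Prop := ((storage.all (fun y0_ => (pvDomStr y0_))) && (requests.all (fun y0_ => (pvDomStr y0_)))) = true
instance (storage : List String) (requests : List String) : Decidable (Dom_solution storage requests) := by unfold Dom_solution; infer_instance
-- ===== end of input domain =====

-- B re-implements the simulation with a different decomposition: it branches on crane vs forklift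
-- first (crane = plain scan-and-zero with no flood fill), and for a forklift it collects the
-- removable containers during the single outside BFS itself instead of re-scanning the whole grid
-- against the visited matrix afterwards (objective: alternative; return value only — neither
-- program mutates its arguments).

-- ===== PORT A =====

-- module-level constant dy_dx
def dyDx : List (Int × Int) := [(0, 1), (1, 0), (0, -1), (-1, 0)]

-- matrix cell read `m[y][x]` / write `m[y][x] = v` (used only at guarded in-range indices)
def mget (mat : List (List Int)) (y x : Int) : Int := (mat.getD y.toNat []).getD x.toNat 0
def mset (mat : List (List Int)) (y x : Int) (v : Int) : List (List Int) :=
  mat.modify y.toNat (fun row => row.set x.toNat v)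
def vget (vis : List (List Bool)) (y x : Int) : Bool := (vis.getD y.toNat []).getD x.toNat false
def vset (vis : List (List Bool)) (y x : Int) (b : Bool) : List (List Bool) :=
  vis.modify y.toNat (fun row => row.set x.toNat b)

-- the `while queue:` loop of check_outside (fuel makes the loop total; the proofs show the
-- supplied fuel drains the queue)
def bfsA (mat : List (List Int)) (n m : Int) :
    Nat → List (Int × Int) → List (List Bool) → List (List Bool)
  | 0, _, vis => vis
  | _ + 1, [], vis => vis
  | fuel + 1, (y, x) :: rest, vis =>
    let st := dyDx.foldl (fun st d =>
      let ny := y + d.1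
      let nx := x + d.2
      if -1 < ny ∧ ny < n ∧ -1 < nx ∧ nx < m then
        if ¬ vget st.2 ny nx = true ∧ mget mat ny nx = 0 then
          (st.1 ++ [(ny, nx)], vset st.2 ny nx true)
        else st
      else st) (rest, vis)
    bfsA mat n m fuel st.1 st.2

def checkOutside (matrix : List (List Int)) : List (List Bool) :=
  let n : Int := matrix.length
  let m : Int := (matrix.headD []).length
  let visited := vset (List.replicate matrix.length (List.replicate (matrix.headD []).length false)) 0 0 true
  bfsA matrix n m (matrix.length * (matrix.headD []).length + 1) [(0, 0)] visited

def solution (storage : List String) (requests : List String) : Int :=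
  let n : Int := storage.length
  let m : Int := (storage.headD "").toList.length
  let mat0 : List (List Int) :=
    (PySem.List.pyRange 0 n).foldl (fun mat i =>
      (PySem.List.pyRange 0 m).foldl (fun mat j =>
        mset mat (i + 1) (j + 1) (((storage.getD i.toNat "").toList.getD j.toNat ' ').toNat : Int)) mat)
      (List.replicate (storage.length + 2) (List.replicate ((storage.headD "").toList.length + 2) (0 : Int)))
  let matF := requests.foldl (fun mat request =>
    let target : Int := ((request.toList.headD ' ').toNat : Int)
    let outside := checkOutside mat
    let toRemove := (PySem.List.pyRange 1 (n + 1)).foldl (fun acc i =>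
      (PySem.List.pyRange 1 (m + 1)).foldl (fun acc j =>
        if mget mat i j = target then
          if request.toList.length = 2 then acc ++ [(i, j)]
          else if dyDx.any (fun d => vget outside (i + d.1) (j + d.2)) then acc ++ [(i, j)]
          else acc
        else acc) acc) ([] : List (Int × Int))
    toRemove.foldl (fun mat rc => mset mat rc.1 rc.2 0) mat) mat0
  matF.foldl (fun acc row => row.foldl (fun acc c => if ¬ c = 0 then acc + 1 else acc) acc) 0

-- ===== PORT B =====

-- the forklift `while queue:` loop of B: one BFS over empty cells that collects the removable
-- containers (a Python set) while expanding
def bfsB (mat : List (List Int)) (target : Int) (n2 m2 : Int) :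
    Nat → List (Int × Int) → List (List Bool) → PySem.Set (Int × Int) →
    List (List Bool) × PySem.Set (Int × Int)
  | 0, _, vis, rem => (vis, rem)
  | _ + 1, [], vis, rem => (vis, rem)
  | fuel + 1, (y, x) :: rest, vis, rem =>
    let st := [((0 : Int), (1 : Int)), (1, 0), (0, -1), (-1, 0)].foldl (fun st d =>
      let ny := y + d.1
      let nx := x + d.2
      if 0 ≤ ny ∧ ny < n2 ∧ 0 ≤ nx ∧ nx < m2 then
        let v := mget mat ny nx
        if v = 0 then
          (if ¬ vget st.2.1 ny nx = true then (st.1 ++ [(ny, nx)], vset st.2.1 ny nx true, st.2.2)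
           else st)
        else if v = target then (st.1, st.2.1, PySem.Set.add st.2.2 (ny, nx))
        else st
      else st) (rest, vis, rem)
    bfsB mat target n2 m2 fuel st.1 st.2.1 st.2.2

def solution_alt (storage : List String) (requests : List String) : Int :=
  let n : Nat := storage.length
  let m : Nat := (storage.headD "").toList.length
  let pad : List Int := List.replicate (m + 2) 0
  let mat0 : List (List Int) :=
    [pad] ++ storage.map (fun row =>
      [(0 : Int)] ++ (row.toList.take m).map (fun ch => (ch.toNat : Int)) ++ [(0 : Int)]) ++ [pad]
  let matF := requests.foldl (fun mat request =>
    let target : Int := ((request.toList.headD ' ').toNat : Int)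
    if request.toList.length = 2 then
      -- crane: zero every matching cell, scanning the rows directly
      mat.map (fun row => (PySem.List.pyRange 0 (m + 2 : Int)).foldl (fun row j =>
        if row.getD j.toNat 0 = target then row.set j.toNat 0 else row) row)
    else
      -- forklift: BFS from the border collecting removables, then zero them
      let res := bfsB mat target (n + 2 : Int) (m + 2 : Int) ((n + 2) * (m + 2) + 1) [(0, 0)]
        (vset (List.replicate (n + 2) (List.replicate (m + 2) false)) 0 0 true) PySem.Set.empty
      res.2.foldl (fun mat rc => mset mat rc.1 rc.2 0) mat) mat0
  matF.foldl (fun acc row => row.foldl (fun acc v => acc + (if ¬ v = 0 then 1 else 0)) acc) 0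

-- ===== PRECONDITION & SPEC =====
-- Pre_ excludes exactly the inputs on which the Python A raises an IndexError: an empty storage,
-- a storage row shorter than the first row, or an empty request string.
def Pre_solution (storage : List String) (requests : List String) : Prop :=
  storage ≠ [] ∧ (∀ row ∈ storage, (storage.headD "").toList.length ≤ row.toList.length) ∧
    (∀ r ∈ requests, r ≠ "")
instance (storage : List String) (requests : List String) : Decidable (Pre_solution storage requests) := by
  unfold Pre_solution; infer_instance

def pvWitness_solution : List String × List String := (["AB", "CA"], ["A", "B1"])

def Spec_solution (storage : List String) (requests : List String) (out : Int) : Prop := out = solution_alt storage requests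
instance (storage : List String) (requests : List String) (out : Int) : Decidable (Spec_solution storage requests out) := by unfold Spec_solution; infer_instance

-- ===== CLAIM (what is proved, stated in full; the proofs are below) =====
def Claim_equal_solution : Prop := ∀ (storage : List String) (requests : List String), Dom_solution storage requests → Pre_solution storage requests → Spec_solution storage requests (solution storage requests)

-- ===== LEMMAS AND PROOFS =====


-- Geometry of padded matrices, proof-side only.
def RectI (mat : List (List Int)) (R C : Nat) : Prop := mat.length = R ∧ ∀ row ∈ mat, row.length = C
def RectB (v : List (List Bool)) (R C : Nat) : Prop := v.length = R ∧ ∀ row ∈ v, row.length = C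
abbrev inB (R C : Nat) (c : Int × Int) : Prop :=
  0 ≤ c.1 ∧ c.1 < (R : Int) ∧ 0 ≤ c.2 ∧ c.2 < (C : Int)
abbrev Adj (p c : Int × Int) : Prop := ∃ d ∈ dyDx, c = (p.1 + d.1, p.2 + d.2)
def cntF (v : List (List Bool)) : Nat := (v.map (fun row => row.count false)).sum
def nbr (y x : Int) (d : Int × Int) : Int × Int := (y + d.1, x + d.2)
abbrev pushP (mat : List (List Int)) (R C : Nat) (v : List (List Bool)) (y x : Int)
    (d : Int × Int) : Prop :=
  inB R C (nbr y x d) ∧ mget mat (y + d.1) (x + d.2) = 0 ∧ vget v (y + d.1) (x + d.2) = false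
def pushList (mat : List (List Int)) (R C : Nat) (y x : Int) (L : List (Int × Int))
    (v : List (List Bool)) : List (Int × Int) :=
  (L.filter (fun d => decide (pushP mat R C v y x d))).map (nbr y x)
def RspecQ (mat : List (List Int)) (target : Int) (R C : Nat) (v : List (List Bool))
    (q : List (Int × Int)) (c : Int × Int) : Prop :=
  inB R C c ∧ mget mat c.1 c.2 = target ∧
    ∃ p, inB R C p ∧ vget v p.1 p.2 = true ∧ p ∉ q ∧ Adj p c

lemma getD_set_getD {α : Type} (row : List α) (i j : Nat) (a d : α) :
    (row.set i a).getD j d = if j = i ∧ i < row.length then a else row.getD j d := by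
  rw [List.getD_eq_getElem?_getD, List.getD_eq_getElem?_getD, List.getElem?_set]
  by_cases h1 : i = j
  · subst h1
    by_cases h2 : i < row.length
    · simp [h2]
    · simp [h2]
  · rw [if_neg h1, if_neg (fun h => h1 h.1.symm)]

lemma getD_modify_getD {α : Type} (v : List α) (k j : Nat) (f : α → α) (d : α) :
    (v.modify k f).getD j d = if j = k ∧ k < v.length then f (v.getD j d) else v.getD j d := by
  rw [List.getD_eq_getElem?_getD, List.getD_eq_getElem?_getD, List.getElem?_modify]
  by_cases h1 : k = j
  · subst h1
    by_cases h2 : k < v.length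
    · simp [h2]
    · simp [h2]
  · have : ¬ (j = k ∧ k < v.length) := fun h => h1 h.1.symm
    rw [if_neg this]
    simp [h1]

lemma vget_vset (v : List (List Bool)) (y x y' x' : Int) (b : Bool) :
    vget (vset v y x b) y' x' =
      if y'.toNat = y.toNat ∧ x'.toNat = x.toNat ∧ y.toNat < v.length ∧
          x.toNat < (v.getD y.toNat []).length then b
      else vget v y' x' := by
  unfold vget vset
  rw [getD_modify_getD]
  by_cases hy : y'.toNat = y.toNat ∧ y.toNat < v.length
  · rw [if_pos hy, getD_set_getD, hy.1]
    by_cases hx : x'.toNat = x.toNat ∧ x.toNat < (v.getD y.toNat []).length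
    · rw [if_pos hx, if_pos ⟨rfl, hx.1, hy.2, hx.2⟩]
    · rw [if_neg hx, if_neg (by tauto)]
  · rw [if_neg hy, if_neg (by tauto)]

lemma mget_mset (mat : List (List Int)) (y x y' x' : Int) (w : Int) :
    mget (mset mat y x w) y' x' =
      if y'.toNat = y.toNat ∧ x'.toNat = x.toNat ∧ y.toNat < mat.length ∧
          x.toNat < (mat.getD y.toNat []).length then w
      else mget mat y' x' := by
  unfold mget mset
  rw [getD_modify_getD]
  by_cases hy : y'.toNat = y.toNat ∧ y.toNat < mat.length
  · rw [if_pos hy, getD_set_getD, hy.1]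
    by_cases hx : x'.toNat = x.toNat ∧ x.toNat < (mat.getD y.toNat []).length
    · rw [if_pos hx, if_pos ⟨rfl, hx.1, hy.2, hx.2⟩]
    · rw [if_neg hx, if_neg (by tauto)]
  · rw [if_neg hy, if_neg (by tauto)]

lemma RectB_vset (v : List (List Bool)) (R C : Nat) (y x : Int) (b : Bool) (h : RectB v R C) :
    RectB (vset v y x b) R C := by
  obtain ⟨h1, h2⟩ := h
  unfold vset
  refine ⟨by simpa using h1, ?_⟩
  intro row hrow
  obtain ⟨i, hi, rfl⟩ := List.mem_iff_getElem.1 hrow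
  have hi' : i < v.length := by simpa using hi
  rw [List.getElem_modify]
  split
  · rw [List.length_set]; exact h2 _ (List.getElem_mem hi')
  · exact h2 _ (List.getElem_mem hi')

lemma RectI_mset (mat : List (List Int)) (R C : Nat) (y x : Int) (w : Int) (h : RectI mat R C) :
    RectI (mset mat y x w) R C := by
  obtain ⟨h1, h2⟩ := h
  unfold mset
  refine ⟨by simpa using h1, ?_⟩
  intro row hrow
  obtain ⟨i, hi, rfl⟩ := List.mem_iff_getElem.1 hrow
  have hi' : i < mat.length := by simpa using hi
  rw [List.getElem_modify]
  split
  · rw [List.length_set]; exact h2 _ (List.getElem_mem hi')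
  · exact h2 _ (List.getElem_mem hi')

lemma rowlen_of_RectB (v : List (List Bool)) (R C : Nat) (h : RectB v R C) (k : Nat) (hk : k < R) :
    (v.getD k []).length = C := by
  have hk' : k < v.length := by rw [h.1]; exact hk
  rw [List.getD_eq_getElem?_getD, List.getElem?_eq_getElem hk']
  exact h.2 _ (List.getElem_mem hk')

lemma rowlen_of_RectI (mat : List (List Int)) (R C : Nat) (h : RectI mat R C) (k : Nat) (hk : k < R) :
    (mat.getD k []).length = C := by
  have hk' : k < mat.length := by rw [h.1]; exact hk
  rw [List.getD_eq_getElem?_getD, List.getElem?_eq_getElem hk']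
  exact h.2 _ (List.getElem_mem hk')

lemma cntF_cons (a : List Bool) (t : List (List Bool)) : cntF (a :: t) = a.count false + cntF t := by
  simp [cntF]

lemma cntF_modify (v : List (List Bool)) (k : Nat) (f : List Bool → List Bool) (hk : k < v.length) :
    cntF (v.modify k f) + (v.getD k []).count false
      = cntF v + (f (v.getD k [])).count false := by
  induction v generalizing k with
  | nil => simp at hk
  | cons a t ih =>
    cases k with
    | zero =>
      have e1 : (a :: t).modify 0 f = f a :: t := rfl
      rw [e1, cntF_cons, cntF_cons]
      simp only [List.getD_cons_zero]
      omega
    | succ k =>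
      have hk' : k < t.length := by simpa using hk
      have e1 : (a :: t).modify (k + 1) f = a :: t.modify k f := rfl
      rw [e1, cntF_cons, cntF_cons]
      simp only [List.getD_cons_succ]
      have := ih k hk'
      omega

lemma count_set_true (row : List Bool) (j : Nat) (hj : j < row.length) (hf : row[j] = false) :
    (row.set j true).count false + 1 = row.count false := by
  rw [List.count_set hj]
  have hmem : false ∈ row := hf ▸ List.getElem_mem hj
  have hpos : 0 < row.count false := List.count_pos_iff.2 hmem
  simp [hf]
  omega

lemma cntF_vset (v : List (List Bool)) (R C : Nat) (y x : Int) (h : RectB v R C)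
    (hin : inB R C (y, x)) (hf : vget v y x = false) :
    cntF (vset v y x true) + 1 = cntF v := by
  obtain ⟨hy0, hyR, hx0, hxC⟩ := hin
  have hk : y.toNat < v.length := by rw [h.1]; omega
  have hrl : (v.getD y.toNat []).length = C := rowlen_of_RectB v R C h y.toNat (by omega)
  have hj : x.toNat < (v.getD y.toNat []).length := by omega
  have hf' : (v.getD y.toNat [])[x.toNat] = false := by
    have : (v.getD y.toNat []).getD x.toNat false = false := hf
    rwa [List.getD_eq_getElem?_getD, List.getElem?_eq_getElem hj] at this
  have h1 := cntF_modify v y.toNat (fun row => row.set x.toNat true) hk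
  have h2 := count_set_true (v.getD y.toNat []) x.toNat hj hf'
  simp only at h1
  unfold vset
  omega

lemma cntF_le (v : List (List Bool)) (R C : Nat) (h : RectB v R C) : cntF v ≤ R * C := by
  obtain ⟨h1, h2⟩ := h
  subst h1
  induction v with
  | nil => simp [cntF]
  | cons a t ih =>
    have ha : a.length = C := h2 a List.mem_cons_self
    have := ih (fun row hr => h2 row (List.mem_cons_of_mem _ hr))
    rw [cntF_cons]
    have hc : a.count false ≤ C := ha ▸ List.count_le_length
    calc a.count false + cntF t ≤ C + t.length * C := by omega
    _ = (a :: t).length * C := by simp [List.length_cons]; ring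


lemma rect_ext (a b : List (List Int)) (R C : Nat) (ha : RectI a R C) (hb : RectI b R C)
    (h : ∀ yk xk : Nat, yk < R → xk < C → mget a yk xk = mget b yk xk) : a = b := by
  apply List.ext_getElem
  · rw [ha.1, hb.1]
  intro i h1 h2
  apply List.ext_getElem
  · rw [ha.2 _ (List.getElem_mem h1), hb.2 _ (List.getElem_mem h2)]
  intro j hj1 hj2
  have hiR : i < R := by rw [← ha.1]; exact h1
  have hjC : j < C := by rw [← ha.2 _ (List.getElem_mem h1)]; exact hj1
  have := h i j hiR hjC
  unfold mget at this
  simp only [Int.toNat_natCast] at this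
  have ea : a.getD i [] = a[i] := by
    rw [List.getD_eq_getElem?_getD, List.getElem?_eq_getElem h1, Option.getD_some]
  have eb : b.getD i [] = b[i] := by
    rw [List.getD_eq_getElem?_getD, List.getElem?_eq_getElem h2, Option.getD_some]
  rw [ea, eb] at this
  have ea2 : a[i].getD j 0 = a[i][j] := by
    rw [List.getD_eq_getElem?_getD, List.getElem?_eq_getElem hj1, Option.getD_some]
  have eb2 : b[i].getD j 0 = b[i][j] := by
    rw [List.getD_eq_getElem?_getD, List.getElem?_eq_getElem hj2, Option.getD_some]
  rw [ea2, eb2] at this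
  exact this


-- Proof-side names for the per-direction step functions of the two BFS loops (definitionally the
-- lambdas inside bfsA / bfsB).
def stepA (mat : List (List Int)) (n m y x : Int)
    (st : List (Int × Int) × List (List Bool)) (d : Int × Int) :
    List (Int × Int) × List (List Bool) :=
  let ny := y + d.1
  let nx := x + d.2
  if -1 < ny ∧ ny < n ∧ -1 < nx ∧ nx < m then
    if ¬ vget st.2 ny nx = true ∧ mget mat ny nx = 0 then
      (st.1 ++ [(ny, nx)], vset st.2 ny nx true)
    else st
  else st

def stepB (mat : List (List Int)) (target n2 m2 y x : Int)
    (st : List (Int × Int) × List (List Bool) × PySem.Set (Int × Int)) (d : Int × Int) :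
    List (Int × Int) × List (List Bool) × PySem.Set (Int × Int) :=
  let ny := y + d.1
  let nx := x + d.2
  if 0 ≤ ny ∧ ny < n2 ∧ 0 ≤ nx ∧ nx < m2 then
    let v := mget mat ny nx
    if v = 0 then
      (if ¬ vget st.2.1 ny nx = true then (st.1 ++ [(ny, nx)], vset st.2.1 ny nx true, st.2.2)
       else st)
    else if v = target then (st.1, st.2.1, PySem.Set.add st.2.2 (ny, nx))
    else st
  else st

lemma bfsA_step (mat : List (List Int)) (n m : Int) (fuel : Nat) (y x : Int)
    (rest : List (Int × Int)) (vis : List (List Bool)) :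
    bfsA mat n m (fuel + 1) ((y, x) :: rest) vis =
      bfsA mat n m fuel (dyDx.foldl (stepA mat n m y x) (rest, vis)).1
        (dyDx.foldl (stepA mat n m y x) (rest, vis)).2 := rfl

lemma bfsB_step (mat : List (List Int)) (target n2 m2 : Int) (fuel : Nat) (y x : Int)
    (rest : List (Int × Int)) (vis : List (List Bool)) (rem : PySem.Set (Int × Int)) :
    bfsB mat target n2 m2 (fuel + 1) ((y, x) :: rest) vis rem =
      bfsB mat target n2 m2 fuel
        (dyDx.foldl (stepB mat target n2 m2 y x) (rest, vis, rem)).1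
        (dyDx.foldl (stepB mat target n2 m2 y x) (rest, vis, rem)).2.1
        (dyDx.foldl (stepB mat target n2 m2 y x) (rest, vis, rem)).2.2 := rfl

lemma vget_vset_eq_of_ne (v : List (List Bool)) (p c : Int × Int) (b : Bool)
    (hp : 0 ≤ p.1 ∧ 0 ≤ p.2) (hc : 0 ≤ c.1 ∧ 0 ≤ c.2) (hne : c ≠ p) :
    vget (vset v p.1 p.2 b) c.1 c.2 = vget v c.1 c.2 := by
  rw [vget_vset]
  have : ¬ (c.1.toNat = p.1.toNat ∧ c.2.toNat = p.2.toNat ∧ p.1.toNat < v.length ∧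
      p.2.toNat < (v.getD p.1.toNat []).length) := by
    rintro ⟨h1, h2, -, -⟩
    exact hne (Prod.ext (by omega) (by omega))
  rw [if_neg this]

lemma vget_vset_iff (v : List (List Bool)) (R C : Nat) (p c : Int × Int)
    (hv : RectB v R C) (hp : inB R C p) (hc : inB R C c) :
    (vget (vset v p.1 p.2 true) c.1 c.2 = true) ↔ (c = p ∨ vget v c.1 c.2 = true) := by
  by_cases hne : c = p
  · subst hne
    rw [vget_vset, if_pos]
    · simp
    refine ⟨rfl, rfl, ?_, ?_⟩
    · rw [hv.1]; omega
    · rw [rowlen_of_RectB v R C hv c.1.toNat (by rw [← hv.1]; rw [hv.1]; omega)]; omega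
  · rw [vget_vset_eq_of_ne v p c true ⟨hp.1, hp.2.2.1⟩ ⟨hc.1, hc.2.2.1⟩ hne]
    simp [hne]

lemma mem_pushList (mat : List (List Int)) (R C : Nat) (y x : Int) (L : List (Int × Int))
    (v : List (List Bool)) (c : Int × Int) :
    c ∈ pushList mat R C y x L v ↔ ∃ d ∈ L, c = nbr y x d ∧ pushP mat R C v y x d := by
  simp only [pushList, List.mem_map, List.mem_filter, decide_eq_true_eq]
  constructor
  · rintro ⟨d, ⟨hdL, hdP⟩, rfl⟩; exact ⟨d, hdL, rfl, hdP⟩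
  · rintro ⟨d, hdL, rfl, hdP⟩; exact ⟨d, ⟨hdL, hdP⟩, rfl⟩

lemma nodup_pushList (mat : List (List Int)) (R C : Nat) (y x : Int) (L : List (Int × Int))
    (v : List (List Bool)) (hnd : (L.map (nbr y x)).Nodup) :
    (pushList mat R C y x L v).Nodup := by
  unfold pushList
  exact hnd.sublist (List.Sublist.map _ List.filter_sublist)

lemma pushList_vset (mat : List (List Int)) (R C : Nat) (y x : Int) (L : List (Int × Int))
    (v : List (List Bool)) (p : Int × Int) (hp : inB R C p)
    (hnot : p ∉ L.map (nbr y x)) :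
    pushList mat R C y x L (vset v p.1 p.2 true) = pushList mat R C y x L v := by
  unfold pushList
  congr 1
  apply List.filter_congr
  intro d hd
  by_cases hin : inB R C (nbr y x d)
  · have hne : nbr y x d ≠ p := by
      intro h; exact hnot (h ▸ List.mem_map_of_mem hd)
    have := vget_vset_eq_of_ne v p (nbr y x d) true ⟨hp.1, hp.2.2.1⟩ ⟨hin.1, hin.2.2.1⟩ hne
    simp only [nbr] at this
    simp [pushP, nbr, this]
  · simp [pushP, hin]


lemma pushP_iff (mat : List (List Int)) (R C : Nat) (v : List (List Bool)) (y x : Int)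
    (d : Int × Int) :
    pushP mat R C v y x d ↔
      ((0 ≤ y + d.1 ∧ y + d.1 < (R : Int) ∧ 0 ≤ x + d.2 ∧ x + d.2 < (C : Int)) ∧
        mget mat (y + d.1) (x + d.2) = 0 ∧ vget v (y + d.1) (x + d.2) = false) := by
  simp [pushP, nbr]

lemma pushList_cons_pos (mat : List (List Int)) (R C : Nat) (y x : Int) (d : Int × Int)
    (L : List (Int × Int)) (v : List (List Bool)) (h : pushP mat R C v y x d) :
    pushList mat R C y x (d :: L) v = nbr y x d :: pushList mat R C y x L v := by
  unfold pushList
  rw [List.filter_cons, if_pos (by simpa using h)]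
  rfl

lemma pushList_cons_neg (mat : List (List Int)) (R C : Nat) (y x : Int) (d : Int × Int)
    (L : List (Int × Int)) (v : List (List Bool)) (h : ¬ pushP mat R C v y x d) :
    pushList mat R C y x (d :: L) v = pushList mat R C y x L v := by
  unfold pushList
  rw [List.filter_cons, if_neg (by simpa using h)]

lemma fold_sim (mat : List (List Int)) (target : Int) (R C : Nat) (y x : Int)
    (htar : ¬ target = 0) :
    ∀ (L : List (Int × Int)) (q : List (Int × Int)) (v : List (List Bool))
      (r : PySem.Set (Int × Int)),
    RectB v R C →
    (L.map (nbr y x)).Nodup →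
    (L.foldl (stepB mat target R C y x) (q, v, r)).1
        = (L.foldl (stepA mat R C y x) (q, v)).1 ∧
    (L.foldl (stepB mat target R C y x) (q, v, r)).2.1
        = (L.foldl (stepA mat R C y x) (q, v)).2 ∧
    (L.foldl (stepA mat R C y x) (q, v)).1 = q ++ pushList mat R C y x L v ∧
    RectB (L.foldl (stepA mat R C y x) (q, v)).2 R C ∧
    (∀ c, inB R C c →
      ((vget (L.foldl (stepA mat R C y x) (q, v)).2 c.1 c.2 = true) ↔
        (vget v c.1 c.2 = true ∨ c ∈ pushList mat R C y x L v))) ∧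
    (∀ c, c ∈ (L.foldl (stepB mat target R C y x) (q, v, r)).2.2 ↔
      (c ∈ r ∨ ∃ d ∈ L, c = nbr y x d ∧ inB R C c ∧ mget mat c.1 c.2 = target)) ∧
    cntF (L.foldl (stepA mat R C y x) (q, v)).2 + (pushList mat R C y x L v).length = cntF v := by
  intro L
  induction L with
  | nil =>
    intro q v r hv hnd
    simp only [List.foldl_nil]
    refine ⟨by simp, by simp, by simp [pushList], hv, ?_, ?_, by simp [pushList]⟩
    · intro c _; simp [pushList]
    · intro c; simp
  | cons d L ih =>
    intro q v r hv hnd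
    simp only [List.map_cons, List.nodup_cons] at hnd
    obtain ⟨hhead, hndL⟩ := hnd
    simp only [List.foldl_cons]
    by_cases hin : 0 ≤ y + d.1 ∧ y + d.1 < (R : Int) ∧ 0 ≤ x + d.2 ∧ x + d.2 < (C : Int)
    · have hinB : inB R C (nbr y x d) := by simpa [nbr] using hin
      have hgA : -1 < y + d.1 ∧ y + d.1 < (R : Int) ∧ -1 < x + d.2 ∧ x + d.2 < (C : Int) := by
        obtain ⟨a1, a2, a3, a4⟩ := hin; exact ⟨by omega, a2, by omega, a4⟩
      by_cases hval : mget mat (y + d.1) (x + d.2) = 0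
      · by_cases hvis : vget v (y + d.1) (x + d.2) = true
        · -- neighbour already visited: both steps do nothing
          have hpd : ¬ pushP mat R C v y x d := by
            rw [pushP_iff]; rintro ⟨-, -, hf⟩; rw [hvis] at hf; cases hf
          have eA : stepA mat (R : Int) (C : Int) y x (q, v) d = (q, v) := by
            simp only [stepA]
            rw [if_pos hgA, if_neg (by rintro ⟨h1, -⟩; exact h1 hvis)]
          have eB : stepB mat target (R : Int) (C : Int) y x (q, v, r) d = (q, v, r) := by
            simp only [stepB]
            rw [if_pos hin, if_pos hval, if_neg (by intro h1; exact h1 hvis)]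
          rw [eA, eB, pushList_cons_neg mat R C y x d L v hpd]
          obtain IHittt := ih q v r hv hndL
          refine ⟨IHittt.1, IHittt.2.1, IHittt.2.2.1, IHittt.2.2.2.1, IHittt.2.2.2.2.1, ?_,
            IHittt.2.2.2.2.2.2⟩
          intro c
          rw [IHittt.2.2.2.2.2.1 c]
          constructor
          · rintro (hc | ⟨d', hd', hrest⟩)
            · exact Or.inl hc
            · exact Or.inr ⟨d', List.mem_cons_of_mem _ hd', hrest⟩
          · rintro (hc | ⟨d', hd', rfl, hcin, hct⟩)
            · exact Or.inl hc
            · rcases List.mem_cons.1 hd' with rfl | hd'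
              · exfalso; simp only [nbr] at hct; rw [hval] at hct; exact htar hct.symm
              · exact Or.inr ⟨d', hd', rfl, hcin, hct⟩
        · -- push the neighbour
          have hvf : vget v (y + d.1) (x + d.2) = false := by
            revert hvis; cases vget v (y + d.1) (x + d.2) <;> simp
          have hpd : pushP mat R C v y x d := by rw [pushP_iff]; exact ⟨hin, hval, hvf⟩
          have eA : stepA mat (R : Int) (C : Int) y x (q, v) d =
              (q ++ [(y + d.1, x + d.2)], vset v (y + d.1) (x + d.2) true) := by
            simp only [stepA]
            rw [if_pos hgA, if_pos ⟨by intro h1; exact hvis h1, hval⟩]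
          have eB : stepB mat target (R : Int) (C : Int) y x (q, v, r) d =
              (q ++ [(y + d.1, x + d.2)], vset v (y + d.1) (x + d.2) true, r) := by
            simp only [stepB]
            rw [if_pos hin, if_pos hval, if_pos (by intro h1; exact hvis h1)]
          rw [eA, eB]
          have hv' : RectB (vset v (y + d.1) (x + d.2) true) R C :=
            RectB_vset v R C _ _ true hv
          obtain IHittt := ih (q ++ [(y + d.1, x + d.2)]) (vset v (y + d.1) (x + d.2) true) r
            hv' hndL
          have hPL : pushList mat R C y x L (vset v (y + d.1) (x + d.2) true)
              = pushList mat R C y x L v := by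
            have := pushList_vset mat R C y x L v (nbr y x d) hinB hhead
            simpa [nbr] using this
          have hPLcons : pushList mat R C y x (d :: L) v
              = nbr y x d :: pushList mat R C y x L v :=
            pushList_cons_pos mat R C y x d L v hpd
          refine ⟨IHittt.1, IHittt.2.1, ?_, IHittt.2.2.2.1, ?_, ?_, ?_⟩
          · rw [IHittt.2.2.1, hPL, hPLcons]
            simp [nbr]
          · intro c hc
            rw [IHittt.2.2.2.2.1 c hc, hPL, hPLcons]
            have hiff : vget (vset v (y + d.1) (x + d.2) true) c.1 c.2 = true ↔
                (c = nbr y x d ∨ vget v c.1 c.2 = true) := by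
              have := vget_vset_iff v R C (nbr y x d) c hv hinB hc
              simpa [nbr] using this
            rw [hiff, List.mem_cons]
            tauto
          · intro c
            rw [IHittt.2.2.2.2.2.1 c]
            constructor
            · rintro (hc | ⟨d', hd', hrest⟩)
              · exact Or.inl hc
              · exact Or.inr ⟨d', List.mem_cons_of_mem _ hd', hrest⟩
            · rintro (hc | ⟨d', hd', rfl, hcin, hct⟩)
              · exact Or.inl hc
              · rcases List.mem_cons.1 hd' with rfl | hd'
                · exfalso; simp only [nbr] at hct; rw [hval] at hct; exact htar hct.symm
                · exact Or.inr ⟨d', hd', rfl, hcin, hct⟩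
          · have hcnt' := cntF_vset v R C (y + d.1) (x + d.2) hv (by exact hin) hvf
            rw [hPLcons]
            have := IHittt.2.2.2.2.2.2
            rw [hPL] at this
            simp only [List.length_cons]
            omega
      · -- neighbour is not empty: A does nothing, B may collect it
        have hpd : ¬ pushP mat R C v y x d := by
          rw [pushP_iff]; rintro ⟨-, h0, -⟩; exact hval h0
        have eA : stepA mat (R : Int) (C : Int) y x (q, v) d = (q, v) := by
          simp only [stepA]
          rw [if_pos hgA, if_neg (by rintro ⟨-, h0⟩; exact hval h0)]
        rw [eA, pushList_cons_neg mat R C y x d L v hpd]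
        by_cases htv : mget mat (y + d.1) (x + d.2) = target
        · have eB : stepB mat target (R : Int) (C : Int) y x (q, v, r) d =
              (q, v, PySem.Set.add r (y + d.1, x + d.2)) := by
            simp only [stepB]
            rw [if_pos hin, if_neg hval, if_pos htv]
          rw [eB]
          obtain IHittt := ih q v (PySem.Set.add r (y + d.1, x + d.2)) hv hndL
          refine ⟨IHittt.1, IHittt.2.1, IHittt.2.2.1, IHittt.2.2.2.1, IHittt.2.2.2.2.1, ?_,
            IHittt.2.2.2.2.2.2⟩
          intro c
          rw [IHittt.2.2.2.2.2.1 c, PySem.Set.mem_add]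
          constructor
          · rintro ((hc | rfl) | ⟨d', hd', hrest⟩)
            · exact Or.inl hc
            · exact Or.inr ⟨d, List.mem_cons_self, by simp [nbr], hinB, htv⟩
            · exact Or.inr ⟨d', List.mem_cons_of_mem _ hd', hrest⟩
          · rintro (hc | ⟨d', hd', rfl, hcin, hct⟩)
            · exact Or.inl (Or.inl hc)
            · rcases List.mem_cons.1 hd' with rfl | hd'
              · exact Or.inl (Or.inr (by simp [nbr]))
              · exact Or.inr ⟨d', hd', rfl, hcin, hct⟩
        · have eB : stepB mat target (R : Int) (C : Int) y x (q, v, r) d = (q, v, r) := by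
            simp only [stepB]
            rw [if_pos hin, if_neg hval, if_neg htv]
          rw [eB]
          obtain IHittt := ih q v r hv hndL
          refine ⟨IHittt.1, IHittt.2.1, IHittt.2.2.1, IHittt.2.2.2.1, IHittt.2.2.2.2.1, ?_,
            IHittt.2.2.2.2.2.2⟩
          intro c
          rw [IHittt.2.2.2.2.2.1 c]
          constructor
          · rintro (hc | ⟨d', hd', hrest⟩)
            · exact Or.inl hc
            · exact Or.inr ⟨d', List.mem_cons_of_mem _ hd', hrest⟩
          · rintro (hc | ⟨d', hd', rfl, hcin, hct⟩)
            · exact Or.inl hc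
            · rcases List.mem_cons.1 hd' with rfl | hd'
              · exfalso; simp only [nbr] at hct; exact htv hct
              · exact Or.inr ⟨d', hd', rfl, hcin, hct⟩
    · -- out of bounds: both steps do nothing
      have hpd : ¬ pushP mat R C v y x d := by rw [pushP_iff]; rintro ⟨h0, -⟩; exact hin h0
      have eA : stepA mat (R : Int) (C : Int) y x (q, v) d = (q, v) := by
        simp only [stepA]
        rw [if_neg (by rintro ⟨a1, a2, a3, a4⟩; exact hin ⟨by omega, a2, by omega, a4⟩)]
      have eB : stepB mat target (R : Int) (C : Int) y x (q, v, r) d = (q, v, r) := by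
        simp only [stepB]
        rw [if_neg hin]
      rw [eA, eB, pushList_cons_neg mat R C y x d L v hpd]
      obtain IHittt := ih q v r hv hndL
      refine ⟨IHittt.1, IHittt.2.1, IHittt.2.2.1, IHittt.2.2.2.1, IHittt.2.2.2.2.1, ?_,
        IHittt.2.2.2.2.2.2⟩
      intro c
      rw [IHittt.2.2.2.2.2.1 c]
      constructor
      · rintro (hc | ⟨d', hd', hrest⟩)
        · exact Or.inl hc
        · exact Or.inr ⟨d', List.mem_cons_of_mem _ hd', hrest⟩
      · rintro (hc | ⟨d', hd', rfl, hcin, hct⟩)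
        · exact Or.inl hc
        · rcases List.mem_cons.1 hd' with rfl | hd'
          · exfalso; exact hin (by simpa [nbr] using hcin)
          · exact Or.inr ⟨d', hd', rfl, hcin, hct⟩


lemma nodup_nbr_dyDx (y x : Int) : (dyDx.map (nbr y x)).Nodup := by
  simp [dyDx, nbr, Prod.ext_iff]

lemma adj_pair_iff (y x : Int) (c : Int × Int) :
    Adj (y, x) c ↔ ∃ d ∈ dyDx, c = nbr y x d := by
  simp [Adj, nbr]

lemma bfs_main (mat : List (List Int)) (target : Int) (R C : Nat) (htar : ¬ target = 0) :
    ∀ (fuel : Nat) (q : List (Int × Int)) (v : List (List Bool)) (r : PySem.Set (Int × Int)),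
    RectB v R C →
    q.Nodup →
    (∀ c ∈ q, inB R C c ∧ vget v c.1 c.2 = true) →
    (∀ c, c ∈ r ↔ RspecQ mat target R C v q c) →
    q.length + cntF v ≤ fuel →
    (bfsB mat target (R : Int) (C : Int) fuel q v r).1 = bfsA mat (R : Int) (C : Int) fuel q v ∧
    RectB (bfsA mat (R : Int) (C : Int) fuel q v) R C ∧
    (∀ c, c ∈ (bfsB mat target (R : Int) (C : Int) fuel q v r).2 ↔
      RspecQ mat target R C (bfsA mat (R : Int) (C : Int) fuel q v) [] c) := by
  intro fuel
  induction fuel with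
  | zero =>
    intro q v r hv hq hqv hr hfuel
    have hq0 : q = [] := List.length_eq_zero_iff.1 (by omega)
    subst hq0
    simp only [bfsA, bfsB]
    refine ⟨trivial, hv, ?_⟩
    intro c
    rw [hr c]
  | succ fuel ih =>
    intro q v r hv hq hqv hr hfuel
    match q with
    | [] =>
      simp only [bfsA, bfsB]
      refine ⟨trivial, hv, ?_⟩
      intro c
      rw [hr c]
    | (y, x) :: rest =>
      rw [bfsA_step, bfsB_step]
      obtain ⟨b1, b2, a1, arect, avis, amem, acnt⟩ :=
        fold_sim mat target R C y x htar dyDx rest v r hv (nodup_nbr_dyDx y x)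
      rw [b1, b2]
      set q' := (dyDx.foldl (stepA mat (R : Int) (C : Int) y x) (rest, v)).1 with hq'def
      set v' := (dyDx.foldl (stepA mat (R : Int) (C : Int) y x) (rest, v)).2 with hv'def
      set r' := (dyDx.foldl (stepB mat target (R : Int) (C : Int) y x) (rest, v, r)).2.2
        with hr'def
      have hrestnd : rest.Nodup := (List.nodup_cons.1 hq).2
      have hheadnotin : (y, x) ∉ rest := (List.nodup_cons.1 hq).1
      have hheadv := hqv (y, x) List.mem_cons_self
      have hpush_unvis : ∀ p ∈ pushList mat R C y x dyDx v, vget v p.1 p.2 = false := by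
        intro p hp
        obtain ⟨d, -, rfl, hP⟩ := (mem_pushList mat R C y x dyDx v p).1 hp
        simpa [nbr] using hP.2.2
      have hpush_inB : ∀ p ∈ pushList mat R C y x dyDx v, inB R C p := by
        intro p hp
        obtain ⟨d, -, rfl, hP⟩ := (mem_pushList mat R C y x dyDx v p).1 hp
        exact hP.1
      have hqnd' : q'.Nodup := by
        rw [a1]
        refine List.Nodup.append hrestnd (nodup_pushList mat R C y x dyDx v
          (nodup_nbr_dyDx y x)) ?_
        intro p hp1 hp2
        have := hqv p (List.mem_cons_of_mem _ hp1)
        rw [hpush_unvis p hp2] at this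
        exact Bool.false_ne_true this.2
      have hqv' : ∀ c ∈ q', inB R C c ∧ vget v' c.1 c.2 = true := by
        intro c hc
        rw [a1] at hc
        rcases List.mem_append.1 hc with hc | hc
        · have h1 := hqv c (List.mem_cons_of_mem _ hc)
          exact ⟨h1.1, (avis c h1.1).2 (Or.inl h1.2)⟩
        · exact ⟨hpush_inB c hc, (avis c (hpush_inB c hc)).2 (Or.inr hc)⟩
      have hkey : ∀ p, inB R C p →
          ((vget v' p.1 p.2 = true ∧ p ∉ q') ↔
            ((vget v p.1 p.2 = true ∧ p ∉ (y, x) :: rest) ∨ p = (y, x))) := by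
        intro p hp
        constructor
        · rintro ⟨hviz, hnq⟩
          rcases (avis p hp).1 hviz with hvp | hvp
          · by_cases hpy : p = (y, x)
            · exact Or.inr hpy
            · refine Or.inl ⟨hvp, ?_⟩
              intro hmem
              rcases List.mem_cons.1 hmem with h | h
              · exact hpy h
              · exact hnq (a1 ▸ List.mem_append_left _ h)
          · exact absurd (a1 ▸ List.mem_append_right rest hvp) hnq
        · rintro (⟨hvp, hnq⟩ | rfl)
          · refine ⟨(avis p hp).2 (Or.inl hvp), ?_⟩
            rw [a1]
            intro hmem
            rcases List.mem_append.1 hmem with h | h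
            · exact hnq (List.mem_cons_of_mem _ h)
            · rw [hpush_unvis p h] at hvp; exact Bool.false_ne_true hvp
          · refine ⟨(avis (y, x) hp).2 (Or.inl hheadv.2), ?_⟩
            rw [a1]
            intro hmem
            rcases List.mem_append.1 hmem with h | h
            · exact hheadnotin h
            · rw [hpush_unvis _ h] at hheadv
              exact Bool.false_ne_true hheadv.2
      have hr' : ∀ c, c ∈ r' ↔ RspecQ mat target R C v' q' c := by
        intro c
        rw [amem c, hr c]
        unfold RspecQ
        constructor
        · rintro (⟨hcin, hct, p, hpin, hpv, hpq, hadj⟩ | ⟨d, hd, rfl, hcin, hct⟩)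
          · exact ⟨hcin, hct, p, hpin, ((hkey p hpin).2 (Or.inl ⟨hpv, hpq⟩)).1,
              ((hkey p hpin).2 (Or.inl ⟨hpv, hpq⟩)).2, hadj⟩
          · exact ⟨hcin, hct, (y, x), hheadv.1,
              ((hkey (y, x) hheadv.1).2 (Or.inr rfl)).1,
              ((hkey (y, x) hheadv.1).2 (Or.inr rfl)).2,
              (adj_pair_iff y x _).2 ⟨d, hd, rfl⟩⟩
        · rintro ⟨hcin, hct, p, hpin, hpv, hpq, hadj⟩
          rcases (hkey p hpin).1 ⟨hpv, hpq⟩ with ⟨hvp, hnq⟩ | rfl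
          · exact Or.inl ⟨hcin, hct, p, hpin, hvp, hnq, hadj⟩
          · obtain ⟨d, hd, rfl⟩ := (adj_pair_iff y x c).1 hadj
            exact Or.inr ⟨d, hd, rfl, hcin, hct⟩
      have hfuel' : q'.length + cntF v' ≤ fuel := by
        have hlen : q'.length = rest.length + (pushList mat R C y x dyDx v).length := by
          rw [a1, List.length_append]
        simp only [List.length_cons] at hfuel
        omega
      exact ih q' v' r' arect hqnd' hqv' hr' hfuel'


def borderZero (mat : List (List Int)) (R C : Nat) : Prop :=
  ∀ yk xk : Nat, yk < R → xk < C → (yk = 0 ∨ yk = R - 1 ∨ xk = 0 ∨ xk = C - 1) →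
    mget mat yk xk = 0

lemma mget_oob (mat : List (List Int)) (y x : Int)
    (h : ¬ (y.toNat < mat.length ∧ x.toNat < (mat.getD y.toNat []).length)) :
    mget mat y x = 0 := by
  unfold mget
  by_cases hy : y.toNat < mat.length
  · have hx : ¬ x.toNat < (mat.getD y.toNat []).length := fun hc => h ⟨hy, hc⟩
    rw [List.getD_eq_getElem?_getD, List.getElem?_eq_none (by omega)]
    rfl
  · rw [List.getD_eq_getElem?_getD (l := mat), List.getElem?_eq_none (by omega)]
    rfl

lemma mget_zero_fold (L : List (Int × Int)) (hL : ∀ c ∈ L, 0 ≤ c.1 ∧ 0 ≤ c.2) :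
    ∀ (mat : List (List Int)) (y x : Int), 0 ≤ y → 0 ≤ x →
    mget (L.foldl (fun mm rc => mset mm rc.1 rc.2 0) mat) y x
      = if (y, x) ∈ L then 0 else mget mat y x := by
  induction L with
  | nil => intro mat y x _ _; simp
  | cons c L ih =>
    intro mat y x hy hx
    simp only [List.foldl_cons]
    rw [ih (fun e he => hL e (List.mem_cons_of_mem _ he)) _ y x hy hx]
    by_cases hmem : (y, x) ∈ L
    · rw [if_pos hmem, if_pos (List.mem_cons_of_mem _ hmem)]
    · rw [if_neg hmem]
      by_cases heq : (y, x) = c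
      · rw [if_pos (List.mem_cons.2 (Or.inl heq))]
        rw [← heq]
        rw [mget_mset]
        split
        · rfl
        · rename_i hcond
          exact mget_oob mat y x (by tauto)
      · rw [if_neg (fun hh => by rcases List.mem_cons.1 hh with h | h; exact heq h; exact hmem h)]
        rw [mget_mset]
        rw [if_neg ?_]
        rintro ⟨h1, h2, -, -⟩
        have hc := hL c List.mem_cons_self
        exact heq (Prod.ext (by omega) (by omega))

lemma RectI_zero_fold (L : List (Int × Int)) (R C : Nat) :
    ∀ (mat : List (List Int)), RectI mat R C →
      RectI (L.foldl (fun mm rc => mset mm rc.1 rc.2 0) mat) R C := by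
  induction L with
  | nil => intro mat h; simpa using h
  | cons c L ih =>
    intro mat h
    simp only [List.foldl_cons]
    exact ih _ (RectI_mset mat R C c.1 c.2 0 h)

lemma vget_replicate (R C : Nat) (y x : Int) :
    vget (List.replicate R (List.replicate C false)) y x = false := by
  unfold vget
  have houter : (List.replicate R (List.replicate C false)).getD y.toNat []
      = if y.toNat < R then List.replicate C false else [] := by
    split
    · rename_i hy
      rw [List.getD_eq_getElem?_getD, List.getElem?_replicate_of_lt hy]
      rfl
    · rename_i hy
      rw [List.getD_eq_getElem?_getD, List.getElem?_eq_none (by simpa using hy)]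
      rfl
  rw [houter]
  split
  · by_cases hx : x.toNat < C
    · rw [List.getD_eq_getElem?_getD, List.getElem?_replicate_of_lt hx]
      rfl
    · rw [List.getD_eq_getElem?_getD, List.getElem?_eq_none (by simpa using hx)]
      rfl
  · simp

lemma RectB_v0 (R C : Nat) :
    RectB (vset (List.replicate R (List.replicate C false)) 0 0 true) R C := by
  apply RectB_vset
  constructor
  · simp
  · intro row hrow
    rw [List.eq_of_mem_replicate hrow]
    simp

lemma vget_v0_self (R C : Nat) (hR : 0 < R) (hC : 0 < C) :
    vget (vset (List.replicate R (List.replicate C false)) 0 0 true) 0 0 = true := by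
  rw [vget_vset, if_pos]
  refine ⟨rfl, rfl, by simpa using hR, ?_⟩
  have : (List.replicate R (List.replicate C false)).getD (0 : Int).toNat []
      = List.replicate C false := by
    rw [List.getD_eq_getElem?_getD, List.getElem?_replicate_of_lt (by simpa using hR)]
    rfl
  rw [this]
  simpa using hC

lemma vget_v0_eq_origin (R C : Nat) (p : Int × Int) (hp : inB R C p)
    (h : vget (vset (List.replicate R (List.replicate C false)) 0 0 true) p.1 p.2 = true) :
    p = (0, 0) := by
  rw [vget_vset] at h
  split at h
  · rename_i hcond
    obtain ⟨h1, h2, -, -⟩ := hcond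
    simp only [Int.toNat_zero] at h1 h2
    exact Prod.ext (by omega) (by omega)
  · rw [vget_replicate] at h
    cases h

lemma target_ne_zero (request : String) (hdom : pvDomStr request = true) :
    ¬ ((request.toList.headD ' ').toNat : Int) = 0 := by
  cases h : request.toList with
  | nil => simp
  | cons c t =>
    simp only [List.headD_cons]
    have hc : pvDomChar c = true := by
      unfold pvDomStr at hdom
      rw [h] at hdom
      exact (List.all_eq_true.1 hdom) c List.mem_cons_self
    simp only [pvDomChar, Bool.or_eq_true, Bool.and_eq_true, decide_eq_true_eq, beq_iff_eq] at hc
    omega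


lemma adj_iff (p c : Int × Int) :
    Adj p c ↔ ((c.1 = p.1 ∧ (c.2 = p.2 + 1 ∨ c.2 = p.2 - 1)) ∨
      (c.2 = p.2 ∧ (c.1 = p.1 + 1 ∨ c.1 = p.1 - 1))) := by
  simp [Adj, dyDx, Prod.ext_iff]
  constructor
  · rintro ⟨a, b, hab, h1, h2⟩
    omega
  · rintro (⟨h1, h2 | h2⟩ | ⟨h1, h2 | h2⟩)
    · exact ⟨0, 1, by omega, by omega, by omega⟩
    · exact ⟨0, -1, by omega, by omega, by omega⟩
    · exact ⟨1, 0, by omega, by omega, by omega⟩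
    · exact ⟨-1, 0, by omega, by omega, by omega⟩

lemma toRemove_mem (mat : List (List Int)) (target : Int) (outside : List (List Bool))
    (nI mI : Int) (request : String) (c : Int × Int) :
    (c ∈ (PySem.List.pyRange 1 (nI + 1)).foldl (fun acc i =>
      (PySem.List.pyRange 1 (mI + 1)).foldl (fun acc j =>
        if mget mat i j = target then
          if request.toList.length = 2 then acc ++ [(i, j)]
          else if dyDx.any (fun d => vget outside (i + d.1) (j + d.2)) then acc ++ [(i, j)]
          else acc
        else acc) acc) ([] : List (Int × Int)))
    ↔ (1 ≤ c.1 ∧ c.1 < nI + 1 ∧ 1 ≤ c.2 ∧ c.2 < mI + 1 ∧ mget mat c.1 c.2 = target ∧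
        (request.toList.length = 2 ∨
          dyDx.any (fun d => vget outside (c.1 + d.1) (c.2 + d.2)) = true)) := by
  have hstep : ∀ (i : Int) (acc : List (Int × Int)),
      (PySem.List.pyRange 1 (mI + 1)).foldl (fun acc j =>
        if mget mat i j = target then
          if request.toList.length = 2 then acc ++ [(i, j)]
          else if dyDx.any (fun d => vget outside (i + d.1) (j + d.2)) then acc ++ [(i, j)]
          else acc
        else acc) acc
      = acc ++ ((PySem.List.pyRange 1 (mI + 1)).filter (fun j =>
          decide (mget mat i j = target ∧ (request.toList.length = 2 ∨
            dyDx.any (fun d => vget outside (i + d.1) (j + d.2)) = true)))).map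
          (fun j => (i, j)) := by
    intro i acc
    rw [PySem.List.foldl_congr_mem _ _
      (fun acc j => if (mget mat i j = target ∧ (request.toList.length = 2 ∨
        dyDx.any (fun d => vget outside (i + d.1) (j + d.2)) = true)) then acc ++ [(i, j)]
        else acc) _ ?_]
    · exact PySem.List.foldl_append_ite _ _ _ _
    · intro acc2 j _
      by_cases h1 : mget mat i j = target
      · by_cases h2 : request.toList.length = 2
        · simp [h1, h2]
        · by_cases h3 : dyDx.any (fun d => vget outside (i + d.1) (j + d.2)) = true
          · simp [h1, h3]
          · simp [h1, h3]
      · simp [h1]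
  rw [PySem.List.foldl_congr_mem _ _
    (fun acc i => acc ++ ((PySem.List.pyRange 1 (mI + 1)).filter (fun j =>
      decide (mget mat i j = target ∧ (request.toList.length = 2 ∨
        dyDx.any (fun d => vget outside (i + d.1) (j + d.2)) = true)))).map (fun j => (i, j)))
    _ (fun acc2 i _ => hstep i acc2)]
  rw [PySem.List.foldl_append_eq_flatMap]
  simp only [List.nil_append, List.mem_flatMap, List.mem_map, List.mem_filter,
    decide_eq_true_eq, PySem.List.mem_pyRange_one]
  constructor
  · rintro ⟨i, hi, j, ⟨hj, hcond⟩, rfl⟩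
    exact ⟨hi.1, hi.2, hj.1, hj.2, hcond.1, hcond.2⟩
  · rintro ⟨h1, h2, h3, h4, h5, h6⟩
    exact ⟨c.1, ⟨h1, h2⟩, c.2, ⟨⟨h3, h4⟩, h5, h6⟩, rfl⟩


lemma crane_row (target : Int) (htar : ¬ target = 0) :
    ∀ (K : Nat) (row : List Int),
    (PySem.List.pyRange 0 (K : Int)).foldl (fun row j =>
      if row.getD j.toNat 0 = target then row.set j.toNat 0 else row) row
    = (row.take K).map (fun v => if v = target then 0 else v) ++ row.drop K := by
  intro K
  induction K with
  | zero =>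
    intro row
    rw [PySem.List.pyRange_one_eq_nil (by omega)]
    simp
  | succ K ih =>
    intro row
    have hcast : ((K + 1 : Nat) : Int) = (K : Int) + 1 := by push_cast; ring
    rw [hcast, PySem.List.pyRange_one_succ_right (by positivity), List.foldl_append,
      List.foldl_cons, List.foldl_nil, ih]
    have htn : (K : Int).toNat = K := by omega
    by_cases hK : K < row.length
    · have hmaplen : ((row.take K).map (fun v => if v = target then 0 else v)).length = K := by
        simp [List.length_take]
        omega
      have h0 : K - ((row.take K).map (fun v => if v = target then 0 else v)).length = 0 := by
        omega
      have hmid : ((row.take K).map (fun v => if v = target then 0 else v) ++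
          row.drop K).getD (K : Int).toNat 0 = row[K] := by
        rw [htn, List.getD_eq_getElem?_getD, List.getElem?_append_right (by omega)]
        rw [h0, List.getElem?_drop, Nat.add_zero, List.getElem?_eq_getElem hK]
        rfl
      rw [hmid]
      have hdropc : row.drop K = row[K] :: row.drop (K + 1) := List.drop_eq_getElem_cons hK
      have htake : row.take (K + 1) = row.take K ++ [row[K]] := by
        rw [List.take_add_one, List.getElem?_eq_getElem hK]
        rfl
      by_cases hv : row[K] = target
      · rw [if_pos hv, htn, List.set_append_right _ _ (by omega), h0, htake, hdropc]
        simp only [List.set_cons_zero, List.map_append, List.map_cons, List.map_nil,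
          if_pos hv, List.append_assoc, List.singleton_append]
      · rw [if_neg hv, htake, hdropc]
        simp only [List.map_append, List.map_cons, List.map_nil, if_neg hv,
          List.append_assoc, List.singleton_append]
    · have htake : row.take K = row := List.take_of_length_le (by omega)
      have htake' : row.take (K + 1) = row := List.take_of_length_le (by omega)
      have hdrop : row.drop K = [] := List.drop_eq_nil_of_le (by omega)
      have hdrop' : row.drop (K + 1) = [] := List.drop_eq_nil_of_le (by omega)
      have hmid : ((row.take K).map (fun v => if v = target then 0 else v) ++
          row.drop K).getD (K : Int).toNat 0 = 0 := by
        rw [htake, hdrop, htn, List.getD_eq_getElem?_getD, List.append_nil,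
          List.getElem?_eq_none (by simp; omega)]
        rfl
      rw [hmid, if_neg (fun h => htar h.symm), htake, htake', hdrop, hdrop']

lemma mget_replicate_zero (R C : Nat) (y x : Int) :
    mget (List.replicate R (List.replicate C (0 : Int))) y x = 0 := by
  unfold mget
  have houter : (List.replicate R (List.replicate C (0 : Int))).getD y.toNat []
      = if y.toNat < R then List.replicate C (0 : Int) else [] := by
    split
    · rename_i hy
      rw [List.getD_eq_getElem?_getD, List.getElem?_replicate_of_lt hy]
      rfl
    · rename_i hy
      rw [List.getD_eq_getElem?_getD, List.getElem?_eq_none (by simpa using hy)]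
      rfl
  rw [houter]
  split
  · by_cases hx : x.toNat < C
    · rw [List.getD_eq_getElem?_getD, List.getElem?_replicate_of_lt hx]
      rfl
    · rw [List.getD_eq_getElem?_getD, List.getElem?_eq_none (by simpa using hx)]
      rfl
  · simp


lemma row_writes (R C : Nat) (iv : Int) (F : Int → Int) (hiv : 0 ≤ iv ∧ iv < (R : Int)) :
    ∀ (K : Nat) (mat : List (List Int)), RectI mat R C → K + 1 ≤ C →
    RectI ((PySem.List.pyRange 0 (K : Int)).foldl
      (fun mm j => mset mm iv (j + 1) (F j)) mat) R C
    ∧ ∀ y x : Int, 0 ≤ y → 0 ≤ x →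
      mget ((PySem.List.pyRange 0 (K : Int)).foldl
        (fun mm j => mset mm iv (j + 1) (F j)) mat) y x
      = if y = iv ∧ 1 ≤ x ∧ x < (K : Int) + 1 then F (x - 1) else mget mat y x := by
  intro K
  induction K with
  | zero =>
    intro mat hrect _
    rw [PySem.List.pyRange_one_eq_nil (by omega)]
    refine ⟨hrect, ?_⟩
    intro y x hy hx
    simp only [List.foldl_nil]
    rw [if_neg (by rintro ⟨-, h1, h2⟩; omega)]
  | succ K ih =>
    intro mat hrect hK1
    have hcast : ((K + 1 : Nat) : Int) = (K : Int) + 1 := by push_cast; ring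
    rw [hcast, PySem.List.pyRange_one_succ_right (by positivity), List.foldl_append,
      List.foldl_cons, List.foldl_nil]
    obtain ⟨prect, ppt⟩ := ih mat hrect (by omega)
    refine ⟨RectI_mset _ _ _ _ _ _ prect, ?_⟩
    intro y x hy hx
    rw [mget_mset]
    have hlen1 : ((PySem.List.pyRange 0 (K : Int)).foldl
        (fun mm j => mset mm iv (j + 1) (F j)) mat).length = R := prect.1
    have hrowlen : (((PySem.List.pyRange 0 (K : Int)).foldl
        (fun mm j => mset mm iv (j + 1) (F j)) mat).getD iv.toNat []).length = C :=
      rowlen_of_RectI _ _ _ prect _ (by omega)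
    by_cases hcond : y = iv ∧ x = (K : Int) + 1
    · rw [if_pos ⟨by omega, by omega, by omega, by omega⟩, if_pos ⟨hcond.1, by omega, by omega⟩]
      have hx1 : x - 1 = (K : Int) := by omega
      rw [hx1]
    · rw [if_neg (by rintro ⟨h1, h2, -, -⟩; exact hcond ⟨by omega, by omega⟩)]
      rw [ppt y x hy hx]
      split_ifs with h1 h2 h2
      · rfl
      · exact absurd ⟨h1.1, by omega, by omega⟩ h2
      · exact absurd ⟨h2.1, by omega⟩ hcond
      · rfl

lemma all_writes (R C : Nat) (mI : Nat) (G : Int → Int → Int) (hm : mI + 1 ≤ C) :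
    ∀ (N : Nat) (mat : List (List Int)), RectI mat R C → N + 1 ≤ R →
    RectI ((PySem.List.pyRange 0 (N : Int)).foldl (fun mm i =>
      (PySem.List.pyRange 0 (mI : Int)).foldl
        (fun mm2 j => mset mm2 (i + 1) (j + 1) (G i j)) mm) mat) R C
    ∧ ∀ y x : Int, 0 ≤ y → 0 ≤ x →
      mget ((PySem.List.pyRange 0 (N : Int)).foldl (fun mm i =>
        (PySem.List.pyRange 0 (mI : Int)).foldl
          (fun mm2 j => mset mm2 (i + 1) (j + 1) (G i j)) mm) mat) y x
      = if 1 ≤ y ∧ y < (N : Int) + 1 ∧ 1 ≤ x ∧ x < (mI : Int) + 1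
        then G (y - 1) (x - 1) else mget mat y x := by
  intro N
  induction N with
  | zero =>
    intro mat hrect _
    rw [show PySem.List.pyRange 0 ((0 : Nat) : Int) = [] from
      PySem.List.pyRange_one_eq_nil (by omega)]
    refine ⟨hrect, ?_⟩
    intro y x hy hx
    simp only [List.foldl_nil]
    rw [if_neg (by rintro ⟨h1, h2, -⟩; omega)]
  | succ N ih =>
    intro mat hrect hN1
    have hcast : ((N + 1 : Nat) : Int) = (N : Int) + 1 := by push_cast; ring
    rw [hcast, PySem.List.pyRange_one_succ_right (by positivity), List.foldl_append,
      List.foldl_cons, List.foldl_nil]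
    obtain ⟨prect, ppt⟩ := ih mat hrect (by omega)
    obtain ⟨rrect, rpt⟩ := row_writes R C ((N : Int) + 1) (fun j => G (N : Int) j)
      ⟨by omega, by omega⟩ mI _ prect (by omega)
    refine ⟨rrect, ?_⟩
    intro y x hy hx
    rw [rpt y x hy hx, ppt y x hy hx]
    by_cases hA : y = (N : Int) + 1 ∧ 1 ≤ x ∧ x < (mI : Int) + 1
    · rw [if_pos hA, if_pos ⟨by omega, by omega, hA.2⟩, hA.1]
      have he : (N : Int) + 1 - 1 = (N : Int) := by omega
      rw [he]
    · rw [if_neg hA]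
      by_cases hB : 1 ≤ y ∧ y < (N : Int) + 1 ∧ 1 ≤ x ∧ x < (mI : Int) + 1
      · rw [if_pos hB, if_pos ⟨hB.1, by omega, hB.2.2⟩]
      · rw [if_neg hB, if_neg ?_]
        rintro ⟨hc1, hc2, hc3, hc4⟩
        by_cases hy' : y = (N : Int) + 1
        · exact hA ⟨hy', hc3, hc4⟩
        · exact hB ⟨hc1, by omega, hc3, hc4⟩

lemma getD_append_left' {α : Type} (l1 l2 : List α) (i : Nat) (d : α) (h : i < l1.length) :
    (l1 ++ l2).getD i d = l1.getD i d := by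
  rw [List.getD_eq_getElem?_getD, List.getElem?_append_left h, ← List.getD_eq_getElem?_getD]

lemma getD_append_right' {α : Type} (l1 l2 : List α) (i : Nat) (d : α) (h : l1.length ≤ i) :
    (l1 ++ l2).getD i d = l2.getD (i - l1.length) d := by
  rw [List.getD_eq_getElem?_getD, List.getElem?_append_right h, ← List.getD_eq_getElem?_getD]

lemma getD_map_in {α β : Type} (f : α → β) (l : List α) (i : Nat) (d : β) (h : i < l.length) :
    (l.map f).getD i d = f l[i] := by
  rw [List.getD_eq_getElem?_getD, List.getElem?_map, List.getElem?_eq_getElem h]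
  rfl

lemma mat0B_spec (storage : List String) (m : Nat)
    (hpre : ∀ row ∈ storage, m ≤ row.toList.length) :
    RectI ([List.replicate (m + 2) (0 : Int)] ++ storage.map (fun row =>
        [(0 : Int)] ++ (row.toList.take m).map (fun ch => (ch.toNat : Int)) ++ [(0 : Int)])
        ++ [List.replicate (m + 2) (0 : Int)]) (storage.length + 2) (m + 2)
    ∧ ∀ yk xk : Nat, yk < storage.length + 2 → xk < m + 2 →
      mget ([List.replicate (m + 2) (0 : Int)] ++ storage.map (fun row =>
        [(0 : Int)] ++ (row.toList.take m).map (fun ch => (ch.toNat : Int)) ++ [(0 : Int)])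
        ++ [List.replicate (m + 2) (0 : Int)]) yk xk
      = if 1 ≤ yk ∧ yk < storage.length + 1 ∧ 1 ≤ xk ∧ xk < m + 1
        then (((storage.getD (yk - 1) "").toList.getD (xk - 1) ' ').toNat : Int) else 0 := by
  constructor
  · constructor
    · simp
    · intro row hrow
      simp only [List.mem_append, List.mem_singleton, List.mem_map] at hrow
      rcases hrow with (hr | ⟨s, hs, rfl⟩) | hr
      · rw [hr]; simp
      · have h2 := hpre s hs
        simp only [String.length_toList] at h2
        simp [List.length_take]
        omega
      · rw [hr]; simp
  · intro yk xk hyk hxk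
    unfold mget
    simp only [Int.toNat_natCast]
    have hrepl : ∀ k : Nat, (List.replicate (m + 2) (0 : Int)).getD k 0 = 0 := by
      intro k
      rw [List.getD_eq_getElem?_getD, List.getElem?_replicate]
      split <;> rfl
    rw [List.append_assoc, List.singleton_append]
    by_cases hy0 : yk = 0
    · subst hy0
      rw [List.getD_cons_zero, hrepl, if_neg (by omega)]
    · obtain ⟨yy, rfl⟩ : ∃ yy, yk = yy + 1 := ⟨yk - 1, by omega⟩
      rw [List.getD_cons_succ]
      by_cases hyy : yy < storage.length
      · -- a storage row
        rw [getD_append_left' _ _ yy _ (by simpa using hyy), getD_map_in _ _ _ _ hyy]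
        have hlen : storage[yy].toList.length ≥ m := by
          have := hpre storage[yy] (List.getElem_mem hyy)
          omega
        have hvlen : ((storage[yy].toList.take m).map (fun ch => (ch.toNat : Int))).length
            = m := by
          rw [List.length_map, List.length_take]
          omega
        rw [List.append_assoc, List.singleton_append]
        by_cases hx0 : xk = 0
        · subst hx0
          rw [List.getD_cons_zero, if_neg (by omega)]
        · obtain ⟨xx, rfl⟩ : ∃ xx, xk = xx + 1 := ⟨xk - 1, by omega⟩
          rw [List.getD_cons_succ]
          by_cases hxx : xx < m
          · rw [getD_append_left' _ _ xx _ (by rw [hvlen]; omega),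
              getD_map_in _ _ _ _ (by rw [List.length_take]; omega)]
            simp only [List.getElem_take]
            rw [if_pos ⟨by omega, by omega, by omega, by omega⟩]
            have hsg : storage.getD (yy + 1 - 1) "" = storage[yy] := by
              rw [List.getD_eq_getElem?_getD, Nat.add_sub_cancel, List.getElem?_eq_getElem hyy]
              rfl
            rw [hsg]
            have hcg : storage[yy].toList.getD (xx + 1 - 1) ' ' = storage[yy].toList[xx] := by
              rw [List.getD_eq_getElem?_getD, Nat.add_sub_cancel,
                List.getElem?_eq_getElem (by omega)]
              rfl
            rw [hcg]
          · have hxm : xx = m := by omega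
            have h0 : xx - ((storage[yy].toList.take m).map
                (fun ch => (ch.toNat : Int))).length = 0 := by rw [hvlen]; omega
            rw [getD_append_right' _ _ xx _ (by rw [hvlen]; omega), h0,
              List.getD_cons_zero, if_neg (by omega)]
      · -- the bottom padding row
        have hym : yy = storage.length := by omega
        subst hym
        rw [getD_append_right' _ _ storage.length _ (by simp), List.length_map, Nat.sub_self,
          List.getD_cons_zero, hrepl, if_neg (by omega)]

lemma RectI_replicate (R C : Nat) : RectI (List.replicate R (List.replicate C (0 : Int))) R C := by
  constructor
  · simp
  · intro row hrow
    rw [List.eq_of_mem_replicate hrow]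
    simp

lemma mat0A_spec (storage : List String) :
    RectI ((PySem.List.pyRange 0 ((storage.length : Nat) : Int)).foldl (fun mat i =>
      (PySem.List.pyRange 0 (((storage.headD "").toList.length : Nat) : Int)).foldl
        (fun mat j => mset mat (i + 1) (j + 1)
          (((storage.getD i.toNat "").toList.getD j.toNat ' ').toNat : Int)) mat)
      (List.replicate (storage.length + 2)
        (List.replicate ((storage.headD "").toList.length + 2) (0 : Int))))
      (storage.length + 2) ((storage.headD "").toList.length + 2)
    ∧ ∀ yk xk : Nat, yk < storage.length + 2 → xk < (storage.headD "").toList.length + 2 →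
      mget ((PySem.List.pyRange 0 ((storage.length : Nat) : Int)).foldl (fun mat i =>
        (PySem.List.pyRange 0 (((storage.headD "").toList.length : Nat) : Int)).foldl
          (fun mat j => mset mat (i + 1) (j + 1)
            (((storage.getD i.toNat "").toList.getD j.toNat ' ').toNat : Int)) mat)
        (List.replicate (storage.length + 2)
          (List.replicate ((storage.headD "").toList.length + 2) (0 : Int)))) yk xk
      = if 1 ≤ yk ∧ yk < storage.length + 1 ∧ 1 ≤ xk ∧ xk < (storage.headD "").toList.length + 1
        then (((storage.getD (yk - 1) "").toList.getD (xk - 1) ' ').toNat : Int) else 0 := by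
  obtain ⟨hrect, hpt⟩ := all_writes (storage.length + 2) ((storage.headD "").toList.length + 2)
    ((storage.headD "").toList.length
)
    (fun i j => (((storage.getD i.toNat "").toList.getD j.toNat ' ').toNat : Int))
    (by omega) storage.length
    (List.replicate (storage.length + 2)
      (List.replicate ((storage.headD "").toList.length + 2) (0 : Int)))
    (RectI_replicate _ _) (by omega)
  refine ⟨hrect, ?_⟩
  intro yk xk hyk hxk
  rw [hpt yk xk (by omega) (by omega), mget_replicate_zero]
  by_cases hcond : 1 ≤ yk ∧ yk < storage.length + 1 ∧ 1 ≤ xk ∧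
      xk < (storage.headD "").toList.length + 1
  · rw [if_pos (by omega), if_pos hcond]
    have h1 : ((yk : Int) - 1).toNat = yk - 1 := by omega
    have h2 : ((xk : Int) - 1).toNat = xk - 1 := by omega
    rw [h1, h2]
  · rw [if_neg (by rintro ⟨c1, c2, c3, c4⟩; exact hcond ⟨by omega, by omega, by omega, by omega⟩),
      if_neg hcond]

lemma mat0_eq (storage : List String)
    (hpre : ∀ row ∈ storage, (storage.headD "").toList.length ≤ row.toList.length) :
    ((PySem.List.pyRange 0 ((storage.length : Nat) : Int)).foldl (fun mat i =>
      (PySem.List.pyRange 0 (((storage.headD "").toList.length : Nat) : Int)).foldl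
        (fun mat j => mset mat (i + 1) (j + 1)
          (((storage.getD i.toNat "").toList.getD j.toNat ' ').toNat : Int)) mat)
      (List.replicate (storage.length + 2)
        (List.replicate ((storage.headD "").toList.length + 2) (0 : Int))))
    = ([List.replicate ((storage.headD "").toList.length + 2) (0 : Int)] ++
        storage.map (fun row => [(0 : Int)] ++
          (row.toList.take ((storage.headD "").toList.length)).map
            (fun ch => (ch.toNat : Int)) ++ [(0 : Int)]) ++
        [List.replicate ((storage.headD "").toList.length + 2) (0 : Int)]) := by
  obtain ⟨harect, hapt⟩ := mat0A_spec storage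
  obtain ⟨hbrect, hbpt⟩ := mat0B_spec storage ((storage.headD "").toList.length) hpre
  apply rect_ext _ _ (storage.length + 2) ((storage.headD "").toList.length + 2) harect hbrect
  intro yk xk hyk hxk
  rw [hapt yk xk hyk hxk, hbpt yk xk hyk hxk]

lemma mat0_border (storage : List String)
    (hpre : ∀ row ∈ storage, (storage.headD "").toList.length ≤ row.toList.length) :
    borderZero ([List.replicate ((storage.headD "").toList.length + 2) (0 : Int)] ++
        storage.map (fun row => [(0 : Int)] ++
          (row.toList.take ((storage.headD "").toList.length)).map
            (fun ch => (ch.toNat : Int)) ++ [(0 : Int)]) ++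
        [List.replicate ((storage.headD "").toList.length + 2) (0 : Int)])
      (storage.length + 2) ((storage.headD "").toList.length + 2) := by
  obtain ⟨hbrect, hbpt⟩ := mat0B_spec storage ((storage.headD "").toList.length) hpre
  intro yk xk hyk hxk hb
  rw [hbpt yk xk hyk hxk, if_neg (by omega)]


-- Proof-side names for the per-request transformations of the two ports.
def reqA (n m : Nat) (mat : List (List Int)) (request : String) : List (List Int) :=
  let target : Int := ((request.toList.headD ' ').toNat : Int)
  let outside := checkOutside mat
  let toRemove := (PySem.List.pyRange 1 ((n : Int) + 1)).foldl (fun acc i =>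
    (PySem.List.pyRange 1 ((m : Int) + 1)).foldl (fun acc j =>
      if mget mat i j = target then
        if request.toList.length = 2 then acc ++ [(i, j)]
        else if dyDx.any (fun d => vget outside (i + d.1) (j + d.2)) then acc ++ [(i, j)]
        else acc
      else acc) acc) ([] : List (Int × Int))
  toRemove.foldl (fun mat rc => mset mat rc.1 rc.2 0) mat

def reqB (n m : Nat) (mat : List (List Int)) (request : String) : List (List Int) :=
  let target : Int := ((request.toList.headD ' ').toNat : Int)
  if request.toList.length = 2 then
    mat.map (fun row => (PySem.List.pyRange 0 ((m : Int) + 2)).foldl (fun row j =>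
      if row.getD j.toNat 0 = target then row.set j.toNat 0 else row) row)
  else
    let res := bfsB mat target ((n : Int) + 2) ((m : Int) + 2) ((n + 2) * (m + 2) + 1) [(0, 0)]
      (vset (List.replicate (n + 2) (List.replicate (m + 2) false)) 0 0 true) PySem.Set.empty
    res.2.foldl (fun mat rc => mset mat rc.1 rc.2 0) mat

lemma zero_fold_good (L : List (Int × Int)) (mat : List (List Int)) (R C : Nat)
    (hrect : RectI mat R C) (hb : borderZero mat R C)
    (hL : ∀ c ∈ L, 0 ≤ c.1 ∧ 0 ≤ c.2) :
    RectI (L.foldl (fun mm rc => mset mm rc.1 rc.2 0) mat) R C ∧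
    borderZero (L.foldl (fun mm rc => mset mm rc.1 rc.2 0) mat) R C := by
  refine ⟨RectI_zero_fold L R C mat hrect, ?_⟩
  intro yk xk hyk hxk hcase
  rw [mget_zero_fold L hL mat yk xk (by omega) (by omega)]
  split
  · rfl
  · exact hb yk xk hyk hxk hcase

lemma req_eq (n m : Nat) (mat : List (List Int)) (request : String)
    (hrect : RectI mat (n + 2) (m + 2)) (hborder : borderZero mat (n + 2) (m + 2))
    (htar : ¬ ((request.toList.headD ' ').toNat : Int) = 0) :
    reqA n m mat request = reqB n m mat request
    ∧ RectI (reqA n m mat request) (n + 2) (m + 2)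
    ∧ borderZero (reqA n m mat request) (n + 2) (m + 2) := by
  simp only [reqA, reqB]
  set T : Int := ((request.toList.headD ' ').toNat : Int) with hT
  by_cases hlen : request.toList.length = 2
  · -- crane
    rw [if_pos hlen]
    have hLrem : ∀ c ∈ ((PySem.List.pyRange 1 ((n : Int) + 1)).foldl (fun acc i =>
        (PySem.List.pyRange 1 ((m : Int) + 1)).foldl (fun acc j =>
          if mget mat i j = T then
            if request.toList.length = 2 then acc ++ [(i, j)]
            else if dyDx.any (fun d => vget (checkOutside mat) (i + d.1) (j + d.2)) then
              acc ++ [(i, j)]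
            else acc
          else acc) acc) ([] : List (Int × Int))), 0 ≤ c.1 ∧ 0 ≤ c.2 := by
      intro c hc
      rw [toRemove_mem] at hc
      exact ⟨by omega, by omega⟩
    obtain ⟨hgrect, hgb⟩ := zero_fold_good _ mat (n + 2) (m + 2) hrect hborder hLrem
    refine ⟨?_, hgrect, hgb⟩
    -- B's crane result, pointwise
    have hBrect : RectI (mat.map (fun row =>
        (PySem.List.pyRange 0 ((m : Int) + 2)).foldl (fun row j =>
          if row.getD j.toNat 0 = T then row.set j.toNat 0 else row) row)) (n + 2) (m + 2) := by
      constructor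
      · simp [hrect.1]
      · intro row hrow
        obtain ⟨row0, hr0, rfl⟩ := List.mem_map.1 hrow
        have hc2 : ((m : Int) + 2) = (((m + 2 : Nat) : Nat) : Int) := by push_cast; ring
        rw [hc2, crane_row T htar]
        have := hrect.2 row0 hr0
        simp [List.length_take]
        omega
    apply rect_ext _ _ (n + 2) (m + 2) hgrect hBrect
    intro yk xk hyk hxk
    rw [mget_zero_fold _ hLrem mat yk xk (by omega) (by omega)]
    -- B pointwise
    have hrowlen : ∀ (row : List Int), row ∈ mat → row.length = m + 2 := hrect.2
    have hmatlen : mat.length = n + 2 := hrect.1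
    have hyklt : yk < mat.length := by omega
    have hBpt : mget (mat.map (fun row =>
        (PySem.List.pyRange 0 ((m : Int) + 2)).foldl (fun row j =>
          if row.getD j.toNat 0 = T then row.set j.toNat 0 else row) row)) yk xk
        = if mget mat yk xk = T then 0 else mget mat yk xk := by
      unfold mget
      simp only [Int.toNat_natCast]
      have hconv : mat.getD yk [] = mat[yk] := by
        rw [List.getD_eq_getElem?_getD, List.getElem?_eq_getElem hyklt]
        rfl
      rw [hconv, getD_map_in _ _ _ _ hyklt]
      have hc2 : ((m : Int) + 2) = (((m + 2 : Nat) : Nat) : Int) := by push_cast; ring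
      rw [hc2, crane_row T htar]
      have hlenr : mat[yk].length = m + 2 := hrowlen _ (List.getElem_mem hyklt)
      rw [List.take_of_length_le (by omega), List.drop_eq_nil_of_le (by omega), List.append_nil]
      by_cases hxk2 : xk < m + 2
      · rw [getD_map_in _ _ _ _ (by omega), List.getD_eq_getElem?_getD,
          List.getElem?_eq_getElem (by omega : xk < mat[yk].length), Option.getD_some]
      · omega
    rw [hBpt]
    by_cases hv : mget mat yk xk = T
    · rw [if_pos hv]
      rw [if_pos ?_]
      rw [toRemove_mem]
      have hint : 1 ≤ yk ∧ yk ≤ n ∧ 1 ≤ xk ∧ xk ≤ m := by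
        by_contra hcon
        have hb0 := hborder yk xk (by omega) (by omega) (by omega)
        rw [hb0] at hv
        exact htar hv.symm
      exact ⟨by omega, by omega, by omega, by omega, hv, Or.inl hlen⟩
    · rw [if_neg hv, if_neg ?_]
      rw [toRemove_mem]
      rintro ⟨-, -, -, -, hv', -⟩
      exact hv hv'
  · -- forklift
    rw [if_neg hlen]
    have hhead : (mat.headD []).length = m + 2 := by
      cases mat with
      | nil => exact absurd hrect.1 (by simp)
      | cons r t => exact hrect.2 r List.mem_cons_self
    have hchk : checkOutside mat = bfsA mat (((n + 2 : Nat) : Nat) : Int) (((m + 2 : Nat) : Nat) : Int)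
        ((n + 2) * (m + 2) + 1) [(0, 0)]
        (vset (List.replicate (n + 2) (List.replicate (m + 2) false)) 0 0 true) := by
      simp only [checkOutside]
      rw [hrect.1, hhead]
    have hc1 : ((n : Int) + 2) = (((n + 2 : Nat) : Nat) : Int) := by push_cast; ring
    have hc2 : ((m : Int) + 2) = (((m + 2 : Nat) : Nat) : Int) := by push_cast; ring
    rw [hc1, hc2]
    obtain ⟨hb1, hbrect, hbmem⟩ := bfs_main mat T (n + 2) (m + 2) htar
      ((n + 2) * (m + 2) + 1) [(0, 0)]
      (vset (List.replicate (n + 2) (List.replicate (m + 2) false)) 0 0 true) PySem.Set.empty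
      (RectB_v0 _ _) (by simp)
      (by
        intro c hc
        rw [List.mem_singleton] at hc
        subst hc
        exact ⟨⟨by omega, by omega, by omega, by omega⟩, vget_v0_self _ _ (by omega) (by omega)⟩)
      (by
        intro c
        constructor
        · intro hc
          exact absurd hc List.not_mem_nil
        · rintro ⟨hcin, hct, p, hpin, hpv, hpq, hadj⟩
          exact absurd (vget_v0_eq_origin (n + 2) (m + 2) p hpin hpv ▸ List.mem_singleton.2 rfl)
            hpq)
      (by
        have := cntF_le _ _ _ (RectB_v0 (n + 2) (m + 2))
        simp only [List.length_singleton]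
        omega)
    have hsets : ∀ c : Int × Int,
        (c ∈ (PySem.List.pyRange 1 ((n : Int) + 1)).foldl (fun acc i =>
          (PySem.List.pyRange 1 ((m : Int) + 1)).foldl (fun acc j =>
            if mget mat i j = T then
              if request.toList.length = 2 then acc ++ [(i, j)]
              else if dyDx.any (fun d => vget (checkOutside mat) (i + d.1) (j + d.2)) then
                acc ++ [(i, j)]
              else acc
            else acc) acc) ([] : List (Int × Int)))
        ↔ c ∈ (bfsB mat T (((n + 2 : Nat) : Nat) : Int) (((m + 2 : Nat) : Nat) : Int)
            ((n + 2) * (m + 2) + 1) [(0, 0)]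
            (vset (List.replicate (n + 2) (List.replicate (m + 2) false)) 0 0 true)
            PySem.Set.empty).2 := by
      intro c
      rw [toRemove_mem, hbmem c, hchk]
      unfold RspecQ
      constructor
      · rintro ⟨h1, h2, h3, h4, h5, h6 | h6⟩
        · exact absurd h6 hlen
        · obtain ⟨d, hd, hdv⟩ := List.any_eq_true.1 h6
          have hd4 : d = ((0 : Int), (1 : Int)) ∨ d = (1, 0) ∨ d = (0, -1) ∨ d = (-1, 0) := by
            simpa [dyDx] using hd
          refine ⟨⟨by omega, by omega, by omega, by omega⟩, h5,
            (c.1 + d.1, c.2 + d.2), ?_, hdv, by simp, ?_⟩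
          · rcases hd4 with rfl | rfl | rfl | rfl <;>
              exact ⟨by omega, by omega, by omega, by omega⟩
          · rw [adj_iff]
            rcases hd4 with rfl | rfl | rfl | rfl <;> simp
      · rintro ⟨hcin, hct, p, hpin, hpv, -, hadj⟩
        have hint : 1 ≤ c.1 ∧ c.1 ≤ (n : Int) ∧ 1 ≤ c.2 ∧ c.2 ≤ (m : Int) := by
          by_contra hcon
          have hb0 := hborder c.1.toNat c.2.toNat (by omega) (by omega) (by omega)
          rw [Int.toNat_of_nonneg (by omega), Int.toNat_of_nonneg (by omega)] at hb0
          rw [hb0] at hct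
          exact htar hct.symm
        refine ⟨by omega, by omega, by omega, by omega, hct, Or.inr ?_⟩
        rw [adj_iff] at hadj
        apply List.any_eq_true.2
        rcases hadj with ⟨he1, he2 | he2⟩ | ⟨he1, he2 | he2⟩
        · refine ⟨(0, -1), by simp [dyDx], ?_⟩
          have e1 : c.1 + (0 : Int) = p.1 := by omega
          have e2 : c.2 + (-1 : Int) = p.2 := by omega
          simpa [e1, e2] using hpv
        · refine ⟨(0, 1), by simp [dyDx], ?_⟩
          have e1 : c.1 + (0 : Int) = p.1 := by omega
          have e2 : c.2 + (1 : Int) = p.2 := by omega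
          simpa [e1, e2] using hpv
        · refine ⟨(-1, 0), by simp [dyDx], ?_⟩
          have e1 : c.1 + (-1 : Int) = p.1 := by omega
          have e2 : c.2 + (0 : Int) = p.2 := by omega
          simpa [e1, e2] using hpv
        · refine ⟨(1, 0), by simp [dyDx], ?_⟩
          have e1 : c.1 + (1 : Int) = p.1 := by omega
          have e2 : c.2 + (0 : Int) = p.2 := by omega
          simpa [e1, e2] using hpv
    have hLrem : ∀ c ∈ ((PySem.List.pyRange 1 ((n : Int) + 1)).foldl (fun acc i =>
        (PySem.List.pyRange 1 ((m : Int) + 1)).foldl (fun acc j =>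
          if mget mat i j = T then
            if request.toList.length = 2 then acc ++ [(i, j)]
            else if dyDx.any (fun d => vget (checkOutside mat) (i + d.1) (j + d.2)) then
              acc ++ [(i, j)]
            else acc
          else acc) acc) ([] : List (Int × Int))), 0 ≤ c.1 ∧ 0 ≤ c.2 := by
      intro c hc
      rw [toRemove_mem] at hc
      exact ⟨by omega, by omega⟩
    have hLb : ∀ c ∈ (bfsB mat T (((n + 2 : Nat) : Nat) : Int) (((m + 2 : Nat) : Nat) : Int)
        ((n + 2) * (m + 2) + 1) [(0, 0)]
        (vset (List.replicate (n + 2) (List.replicate (m + 2) false)) 0 0 true)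
        PySem.Set.empty).2, 0 ≤ c.1 ∧ 0 ≤ c.2 := by
      intro c hc
      obtain ⟨hcin, -, -⟩ := (hbmem c).1 hc
      exact ⟨by omega, by omega⟩
    obtain ⟨hgrect, hgb⟩ := zero_fold_good _ mat (n + 2) (m + 2) hrect hborder hLrem
    refine ⟨?_, hgrect, hgb⟩
    apply rect_ext _ _ (n + 2) (m + 2) hgrect
      (RectI_zero_fold _ _ _ mat hrect)
    intro yk xk hyk hxk
    rw [mget_zero_fold _ hLrem mat yk xk (by omega) (by omega),
      mget_zero_fold _ hLb mat yk xk (by omega) (by omega)]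
    by_cases hmem : (((yk : Nat) : Int), ((xk : Nat) : Int)) ∈
        (PySem.List.pyRange 1 ((n : Int) + 1)).foldl (fun acc i =>
          (PySem.List.pyRange 1 ((m : Int) + 1)).foldl (fun acc j =>
            if mget mat i j = T then
              if request.toList.length = 2 then acc ++ [(i, j)]
              else if dyDx.any (fun d => vget (checkOutside mat) (i + d.1) (j + d.2)) then
                acc ++ [(i, j)]
              else acc
            else acc) acc) ([] : List (Int × Int))
    · rw [if_pos hmem, if_pos ((hsets _).1 hmem)]
    · rw [if_neg hmem, if_neg (fun hc => hmem ((hsets _).2 hc))]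


lemma fold_req_eq (n m : Nat) : ∀ (reqs : List String) (mat : List (List Int)),
    (∀ r ∈ reqs, pvDomStr r = true) →
    RectI mat (n + 2) (m + 2) → borderZero mat (n + 2) (m + 2) →
    reqs.foldl (reqA n m) mat = reqs.foldl (reqB n m) mat := by
  intro reqs
  induction reqs with
  | nil => intro mat _ _ _; rfl
  | cons r t ih =>
    intro mat hdom hrect hb
    simp only [List.foldl_cons]
    obtain ⟨heq, hr1, hb1⟩ := req_eq n m mat r hrect hb
      (target_ne_zero r (hdom r List.mem_cons_self))
    rw [← heq]
    exact ih (reqA n m mat r) (fun s hs => hdom s (List.mem_cons_of_mem _ hs)) hr1 hb1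

lemma count_eq (mat : List (List Int)) :
    mat.foldl (fun acc row => row.foldl
      (fun acc c => if ¬ c = 0 then acc + 1 else acc) acc) (0 : Int)
    = mat.foldl (fun acc row => row.foldl
      (fun acc v => acc + (if ¬ v = 0 then 1 else 0)) acc) (0 : Int) := by
  apply PySem.List.foldl_congr_mem
  intro acc row _
  apply PySem.List.foldl_congr_mem
  intro acc2 c _
  by_cases h : c = 0
  · simp [h]
  · simp [h]

-- ===== VERDICT (by name: the statement is the Claim_ definition above) =====
theorem solution_spec : Claim_equal_solution := by
  unfold Claim_equal_solution
  intro storage requests hdom hpre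
  unfold Spec_solution
  obtain ⟨-, hrows, -⟩ := hpre
  have hdr : ∀ r ∈ requests, pvDomStr r = true := by
    unfold Dom_solution at hdom
    simp only [Bool.and_eq_true, List.all_eq_true] at hdom
    exact fun r hr => hdom.2 r hr
  obtain ⟨hbrect, -⟩ := mat0B_spec storage ((storage.headD "").toList.length) hrows
  have hbborder := mat0_border storage hrows
  show solution storage requests = solution_alt storage requests
  have h1 : solution storage requests
      = (requests.foldl (reqA storage.length ((storage.headD "").toList.length))
          ((PySem.List.pyRange 0 ((storage.length : Nat) : Int)).foldl (fun mat i =>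
            (PySem.List.pyRange 0 (((storage.headD "").toList.length : Nat) : Int)).foldl
              (fun mat j => mset mat (i + 1) (j + 1)
                (((storage.getD i.toNat "").toList.getD j.toNat ' ').toNat : Int)) mat)
            (List.replicate (storage.length + 2)
              (List.replicate ((storage.headD "").toList.length + 2) (0 : Int))))).foldl
        (fun acc row => row.foldl (fun acc c => if ¬ c = 0 then acc + 1 else acc) acc)
        (0 : Int) := rfl
  have h2 : solution_alt storage requests
      = (requests.foldl (reqB storage.length ((storage.headD "").toList.length))
          ([List.replicate ((storage.headD "").toList.length + 2) (0 : Int)] ++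
            storage.map (fun row => [(0 : Int)] ++
              (row.toList.take ((storage.headD "").toList.length)).map
                (fun ch => (ch.toNat : Int)) ++ [(0 : Int)]) ++
            [List.replicate ((storage.headD "").toList.length + 2) (0 : Int)])).foldl
        (fun acc row => row.foldl (fun acc v => acc + (if ¬ v = 0 then 1 else 0)) acc)
        (0 : Int) := rfl
  rw [h1, h2, mat0_eq storage hrows,
    fold_req_eq storage.length ((storage.headD "").toList.length) requests _ hdr hbrect hbborder,
    count_eq]
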